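-- pv_equiv track=rewrite | github.com/lanhongvp/deep-person-reid | torchreid/data_manager/aicity666.py | vid2label
-- ===== SOURCE A (Python) =====
-- def vid2label(id):
--     sort_id = list(set(id))
--     sort_id.sort()
--     num_id = len(sort_id)
--     label = []
--     for x in id:
--         label.append(sort_id.index(x))
--
--     return label,num_id
-- ===== SOURCE B (Python) =====
-- def vid2label(id):
--     # rank of x = number of distinct values smaller than x; no sorting, no .index scans
--     uniq = set(id)
--     label = [sum(1 for u in uniq if u < x) for x in id]
--     return label, len(uniq)
-- ===== Notes on version B (the rewrite author's own statement) =====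
-- stated objective: alternative
-- what changed: B drops the sort and the per-element list.index scan entirely: the rank of each element is computed directly as the number of distinct values smaller than it, counted over the set in one comprehension.
import Mathlib
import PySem

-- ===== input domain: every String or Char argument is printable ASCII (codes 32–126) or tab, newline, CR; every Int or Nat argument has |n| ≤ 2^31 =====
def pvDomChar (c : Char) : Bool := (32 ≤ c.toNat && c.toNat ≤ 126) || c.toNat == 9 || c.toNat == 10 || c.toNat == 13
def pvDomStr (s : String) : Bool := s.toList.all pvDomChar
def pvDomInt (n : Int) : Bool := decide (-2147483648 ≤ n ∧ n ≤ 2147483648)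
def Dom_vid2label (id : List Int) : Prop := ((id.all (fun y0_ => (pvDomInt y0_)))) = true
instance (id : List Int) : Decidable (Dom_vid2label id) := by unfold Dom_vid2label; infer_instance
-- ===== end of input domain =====

-- B replaces A's sort + per-element list.index scan by directly counting, for each
-- element, the distinct values smaller than it (no sorting at all).

-- ===== PORT A =====
-- sort_id = sorted(list(set(id))); label appends sort_id.index(x) for each x
-- (x is always in sort_id, so .index never raises; getD 0 is never taken).
def vid2label (id : List Int) : List Int × Int :=
  let sort_id := PySem.List.sorted (PySem.Set.ofList id) (fun x => x) false
  let num_id : Int := sort_id.length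
  let label : List Int :=
    id.foldl (fun acc x => acc ++ [(((PySem.List.index? sort_id x).getD 0 : Nat) : Int)]) []
  (label, num_id)

-- ===== PORT B =====
-- uniq = set(id); label[i] = sum(1 for u in uniq if u < id[i])
def vid2label_alt (id : List Int) : List Int × Int :=
  let uniq := PySem.Set.ofList id
  let label := id.map (fun x => uniq.foldl (fun acc u => if u < x then acc + 1 else acc) (0 : Int))
  (label, (uniq.length : Int))

-- ===== PRECONDITION & SPEC =====
def Spec_vid2label (id : List Int) (out : List Int × Int) : Prop := out = vid2label_alt id
instance (id : List Int) (out : List Int × Int) : Decidable (Spec_vid2label id out) := by unfold Spec_vid2label; infer_instance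

-- ===== CLAIM (what is proved, stated in full; the proofs are below) =====
def Claim_equal_vid2label : Prop := ∀ (id : List Int), Dom_vid2label id → Spec_vid2label id (vid2label id)

-- ===== LEMMAS AND PROOFS =====

-- In a strictly increasing list, the index of a member equals the number of elements below it.
theorem index_eq_countP_lt (l : List Int) (x : Int)
    (hp : l.Pairwise (· < ·)) (hx : x ∈ l) :
    PySem.List.index? l x = some (l.countP (fun u => decide (u < x))) := by
  induction l with
  | nil => cases hx
  | cons a t ih =>
    rcases List.pairwise_cons.mp hp with ⟨ha, ht⟩
    by_cases hax : a = x
    · subst hax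
      have h0 : t.countP (fun u => decide (u < a)) = 0 := by
        rw [List.countP_eq_zero]
        intro u hu
        simp only [decide_eq_true_eq]
        exact not_lt.mpr (le_of_lt (ha u hu))
      rw [PySem.List.index?_cons_self]
      simp [h0]
    · have hxt : x ∈ t := by
        cases List.mem_cons.mp hx with
        | inl h => exact absurd h.symm hax
        | inr h => exact h
      have halt : a < x := ha x hxt
      rw [PySem.List.index?_cons_of_ne t hax, ih ht hxt]
      simp [halt]

-- foldl-append builds the map.
theorem foldl_append_map (l : List Int) (f : Int → Int) (acc : List Int) :
    l.foldl (fun acc x => acc ++ [f x]) acc = acc ++ l.map f := by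
  induction l generalizing acc with
  | nil => simp
  | cons a t ih => simp [List.foldl_cons, ih]

theorem vid2label_spec : Claim_equal_vid2label := by
  intro id _
  unfold Spec_vid2label vid2label vid2label_alt
  have hperm : (PySem.List.sorted (PySem.Set.ofList id) (fun x => x) false).Perm
      (PySem.Set.ofList id) := PySem.List.sorted_perm _ _ _
  refine Prod.ext ?_ ?_
  · -- labels
    simp only [foldl_append_map, List.nil_append]
    apply List.map_congr_left
    intro x hx
    have hmem : x ∈ PySem.List.sorted (PySem.Set.ofList id) (fun x => x) false := by
      rw [PySem.List.mem_sorted, PySem.Set.mem_ofList]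
      exact hx
    rw [index_eq_countP_lt _ x (PySem.List.sorted_ofList_pairwise_lt id) hmem]
    rw [PySem.List.foldl_ite_add_one]
    have := hperm.countP_eq (fun u => decide (u < x))
    simp only [Option.getD_some, this]
    norm_num
  · -- counts
    simp [hperm.length_eq]
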